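-- pv_equiv track=rewrite | github.com/MichaelHeUVA/Leetcode | Unsorted Problems/Medium/2340. Minimum Adjacent Swaps to Make a Valid Array.py | minimumSwaps
-- ===== SOURCE A (Python) =====
-- from typing import List
--
-- def minimumSwaps(nums: List[int]) -> int:
--     max_index = 0
--     min_index = 0
--     for i in range(len(nums)):
--         if nums[max_index] <= nums[i]:
--             max_index = i
--         if nums[min_index] > nums[i]:
--             min_index = i
--
--     if min_index == max_index:
--         return 0
--     if min_index < max_index:
--         return min_index + ((len(nums) - 1) - max_index)
--     else:
--         return min_index + ((len(nums) - 1) - max_index) - 1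
-- ===== SOURCE B (Python) =====
-- def bubble_front(a, v):
--     """Move the first occurrence of v to the front by adjacent swaps:
--     every element skipped over on the way is exactly one swap."""
--     moved = [v]
--     swaps = 0
--     it = iter(a)
--     for x in it:
--         if x == v:
--             break
--         moved.append(x)
--         swaps += 1
--     moved.extend(it)
--     return moved, swaps
--
--
-- def minimumSwaps(nums):
--     if not nums:
--         return 0
--     a, s1 = bubble_front(nums, min(nums))        # bring the first minimum to the front
--     _, s2 = bubble_front(a[::-1], max(nums))     # push the last maximum to the back (front of the reverse)
--     return s1 + s2
-- ===== Notes on version B (the rewrite author's own statement) =====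
-- stated objective: alternative
-- what changed: B simulates the swaps instead of computing them from indices: a bubble_front helper physically moves the first minimum to the front (and, applied to the reversed list, the last maximum to the back), counting one swap per element passed, and returns the sum of the two counts; there is no index arithmetic and no three-branch formula.
import Mathlib
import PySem

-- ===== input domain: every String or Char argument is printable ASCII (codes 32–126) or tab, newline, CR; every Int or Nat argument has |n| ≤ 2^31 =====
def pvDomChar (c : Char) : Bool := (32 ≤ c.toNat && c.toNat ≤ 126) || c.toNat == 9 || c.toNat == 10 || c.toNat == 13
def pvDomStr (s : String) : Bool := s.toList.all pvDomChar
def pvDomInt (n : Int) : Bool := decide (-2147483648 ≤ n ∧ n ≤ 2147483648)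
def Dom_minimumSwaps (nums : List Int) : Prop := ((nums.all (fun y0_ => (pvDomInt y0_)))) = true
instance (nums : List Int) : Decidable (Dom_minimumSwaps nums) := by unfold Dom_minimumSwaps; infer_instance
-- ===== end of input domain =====

-- B simulates the swaps (bubble the first min to the front, the last max — via the reverse — to the back,
-- counting one swap per element passed) instead of A's index tracking and three-branch formula (alternative; same cost).

-- ===== PORT A =====
-- helper: the body of A's for-loop (max_index update, then min_index update)
def stepA (nums : List Int) (s : Nat × Nat) (i : Nat) : Nat × Nat :=
  (if nums.getD s.1 0 ≤ nums.getD i 0 then i else s.1,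
   if nums.getD s.2 0 > nums.getD i 0 then i else s.2)

-- A's loop 'for i in range(len(nums))'; every index accessed is in range, so getD is exact for nums[..]
def loopA (nums : List Int) : Nat × Nat :=
  (List.range nums.length).foldl (stepA nums) (0, 0)

def minimumSwaps (nums : List Int) : Int :=
  let s := loopA nums
  let max_index := s.1
  let min_index := s.2
  if min_index = max_index then 0
  else if min_index < max_index then
    (min_index : Int) + (((nums.length : Int) - 1) - (max_index : Int))
  else
    (min_index : Int) + (((nums.length : Int) - 1) - (max_index : Int)) - 1

-- ===== PORT B =====
-- bubble_front's for-loop over the iterator: elements before the first v are skipped over (one swap each,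
-- appended after v); the break keeps the rest untouched. Returns (list after the leading v, swap count).
def bubbleGo : List Int → Int → List Int × Int
  | [], _ => ([], 0)            -- iterator exhausted without a break (unreachable here: v is a member)
  | x :: t, v =>
    if x = v then (t, 0)
    else
      let p := bubbleGo t v
      (x :: p.1, p.2 + 1)

def bubbleFront (a : List Int) (v : Int) : List Int × Int :=
  let p := bubbleGo a v
  (v :: p.1, p.2)

def minimumSwaps_alt (nums : List Int) : Int :=
  if nums = [] then 0
  else
    let p1 := bubbleFront nums ((PySem.List.min? nums (fun x => x)).getD 0)   -- min(nums) to the front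
    let p2 := bubbleFront ((PySem.List.slice? p1.1 none none (-1)).getD [])   -- a[::-1]
                ((PySem.List.max? nums (fun x => x)).getD 0)                  -- max(nums) to the back
    p1.2 + p2.2

-- ===== PRECONDITION & SPEC =====
def Spec_minimumSwaps (nums : List Int) (out : Int) : Prop := out = minimumSwaps_alt nums
instance (nums : List Int) (out : Int) : Decidable (Spec_minimumSwaps nums out) := by unfold Spec_minimumSwaps; infer_instance

-- ===== CLAIM (what is proved, stated in full; the proofs are below) =====
def Claim_equal_minimumSwaps : Prop := ∀ (nums : List Int), Dom_minimumSwaps nums → Spec_minimumSwaps nums (minimumSwaps nums)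

-- ===== LEMMAS AND PROOFS =====

-- the minimum / maximum values B computes
def mnv (l : List Int) : Int := (PySem.List.min? l (fun x => x)).getD 0
def mxv (l : List Int) : Int := (PySem.List.max? l (fun x => x)).getD 0

theorem mnv_cons (h : Int) (t : List Int) : mnv (h :: t) = t.foldl min h := by
  simp [mnv, PySem.List.min?_id_cons]
theorem mxv_cons (h : Int) (t : List Int) : mxv (h :: t) = t.foldl max h := by
  simp [mxv, PySem.List.max?_id_cons]

theorem mnv_isMin (l : List Int) (hl : l ≠ []) : ∀ y ∈ l, mnv l ≤ y := by
  cases l with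
  | nil => exact absurd rfl hl
  | cons h t =>
    intro y hy
    rw [mnv_cons]
    rcases List.mem_cons.mp hy with rfl | hy
    · exact (PySem.List.foldl_min_le t y).1
    · exact (PySem.List.foldl_min_le t h).2 y hy

theorem mnv_mem (l : List Int) (hl : l ≠ []) : mnv l ∈ l := by
  cases l with
  | nil => exact absurd rfl hl
  | cons h t =>
    rw [mnv_cons]
    rcases PySem.List.foldl_min_mem t h with he | he
    · rw [he]; exact List.mem_cons_self
    · exact List.mem_cons_of_mem _ he

theorem mxv_isMax (l : List Int) (hl : l ≠ []) : ∀ y ∈ l, y ≤ mxv l := by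
  cases l with
  | nil => exact absurd rfl hl
  | cons h t =>
    intro y hy
    rw [mxv_cons]
    rcases List.mem_cons.mp hy with rfl | hy
    · exact (PySem.List.le_foldl_max t y).1
    · exact (PySem.List.le_foldl_max t h).2 y hy

theorem mnv_append (l : List Int) (x : Int) (hl : l ≠ []) : mnv (l ++ [x]) = min (mnv l) x := by
  cases l with
  | nil => exact absurd rfl hl
  | cons h t => rw [List.cons_append, mnv_cons, mnv_cons, List.foldl_append]; rfl

theorem mxv_append (l : List Int) (x : Int) (hl : l ≠ []) : mxv (l ++ [x]) = max (mxv l) x := by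
  cases l with
  | nil => exact absurd rfl hl
  | cons h t => rw [List.cons_append, mxv_cons, mxv_cons, List.foldl_append]; rfl

-- folding A's step over in-range indices never sees an appended element
theorem foldl_stepA_append (l : List Int) (x : Int) :
    ∀ (idxs : List Nat) (s : Nat × Nat), (∀ i ∈ idxs, i < l.length) →
      s.1 < l.length → s.2 < l.length →
      idxs.foldl (stepA (l ++ [x])) s = idxs.foldl (stepA l) s := by
  intro idxs
  induction idxs with
  | nil => intro s _ _ _; rfl
  | cons i rest ih =>
    intro s hall h1 h2
    have hi : i < l.length := hall i (by simp)
    have hstep : stepA (l ++ [x]) s i = stepA l s i := by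
      simp [stepA, List.getD, List.getElem?_append_left hi, List.getElem?_append_left h1,
        List.getElem?_append_left h2]
    simp only [List.foldl_cons, hstep]
    apply ih _ (fun j hj => hall j (by simp [hj]))
    · unfold stepA; dsimp only; split <;> assumption
    · unfold stepA; dsimp only; split <;> assumption

-- the main invariant: A's loop state is (last index of the maximum, first index of the minimum)
theorem loopA_inv : ∀ (l : List Int), l ≠ [] →
    (loopA l).1 < l.length ∧ (loopA l).2 < l.length ∧
    l.getD (loopA l).1 0 = mxv l ∧ l.getD (loopA l).2 0 = mnv l ∧
    PySem.List.index? l (mnv l) = some (loopA l).2 ∧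
    PySem.List.index? l.reverse (mxv l) = some (l.length - 1 - (loopA l).1) := by
  intro l
  induction l using List.reverseRecOn with
  | nil => intro hl; exact absurd rfl hl
  | append_singleton l x ih =>
    intro _
    rcases eq_or_ne l [] with rfl | hl
    · simp [loopA, stepA, mnv_cons, mxv_cons]
    · obtain ⟨ih1, ih2, ih3, ih4, ih5, ih6⟩ := ih hl
      have hn : 0 < l.length := List.length_pos_of_ne_nil hl
      -- one unrolling of the loop over l ++ [x]
      have hloop : loopA (l ++ [x]) = stepA (l ++ [x]) (loopA l) l.length := by
        unfold loopA
        rw [List.length_append, List.length_singleton, List.range_succ, List.foldl_append,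
          foldl_stepA_append l x (List.range l.length) (0, 0)
            (fun i hi => List.mem_range.mp hi) hn hn]
        rfl
      have hgx : (l ++ [x]).getD l.length 0 = x := by
        simp [List.getD]
      have hgmx : (l ++ [x]).getD (loopA l).1 0 = mxv l := by
        rw [List.getD, List.getElem?_append_left ih1, ← List.getD, ih3]
      have hgmn : (l ++ [x]).getD (loopA l).2 0 = mnv l := by
        rw [List.getD, List.getElem?_append_left ih2, ← List.getD, ih4]
      have hfst : (loopA (l ++ [x])).1 = if mxv l ≤ x then l.length else (loopA l).1 := by
        rw [hloop]; simp only [stepA]; rw [hgmx, hgx]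
      have hsnd : (loopA (l ++ [x])).2 = if x < mnv l then l.length else (loopA l).2 := by
        rw [hloop]; simp only [stepA, gt_iff_lt]; rw [hgmn, hgx]
      have hmnv := mnv_append l x hl
      have hmxv := mxv_append l x hl
      have hlen : (l ++ [x]).length = l.length + 1 := by simp
      refine ⟨?_, ?_, ?_, ?_, ?_, ?_⟩
      · rw [hfst, hlen]; split <;> omega
      · rw [hsnd, hlen]; split <;> omega
      · rw [hfst, hmxv]
        by_cases hc : mxv l ≤ x
        · rw [if_pos hc, hgx, max_eq_right hc]
        · rw [if_neg hc, hgmx, max_eq_left (by omega)]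
      · rw [hsnd, hmnv]
        by_cases hc : x < mnv l
        · rw [if_pos hc, hgx, min_eq_right (le_of_lt hc)]
        · rw [if_neg hc, hgmn, min_eq_left (by omega)]
      · rw [hsnd, hmnv]
        by_cases hc : x < mnv l
        · rw [if_pos hc, min_eq_right (le_of_lt hc)]
          have hnot : x ∉ l := fun hx => absurd (mnv_isMin l hl x hx) (by omega)
          exact PySem.List.index?_append_singleton_self l x hnot
        · rw [if_neg hc, min_eq_left (by omega),
            PySem.List.index?_append_of_mem (t := [x]) (mnv_mem l hl), ih5]
      · rw [hfst, hmxv, hlen]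
        simp only [List.reverse_append, List.reverse_singleton, List.singleton_append]
        by_cases hc : mxv l ≤ x
        · rw [if_pos hc, max_eq_right hc, PySem.List.index?_cons_self]
          congr 1
          omega
        · rw [if_neg hc, max_eq_left (by omega)]
          have hne : x ≠ mxv l := by omega
          rw [PySem.List.index?_cons_of_ne l.reverse hne, ih6]
          simp only [Option.map_some]
          congr 1
          omega

-- B's loop on a list whose first occurrence of v splits it as P ++ v :: Z
theorem bubbleGo_split (v : Int) : ∀ (P Z : List Int), v ∉ P →
    bubbleGo (P ++ v :: Z) v = (P ++ Z, (P.length : Int)) := by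
  intro P
  induction P with
  | nil => intro Z _; simp [bubbleGo]
  | cons x P ih =>
    intro Z hv
    have hx : x ≠ v := fun h => hv (h ▸ List.mem_cons_self)
    have ht : v ∉ P := fun h => hv (List.mem_cons_of_mem _ h)
    simp only [List.cons_append, bubbleGo, if_neg hx, ih Z ht, List.length_cons]
    simp only [Prod.mk.injEq, true_and]
    push_cast
    ring

-- the swap count of B's loop is the index of the first occurrence
theorem bubbleGo_snd (v : Int) : ∀ (a : List Int) (k : Nat),
    PySem.List.index? a v = some k → (bubbleGo a v).2 = (k : Int) := by
  intro a
  induction a with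
  | nil => intro k h; simp [PySem.List.index?_eq_idxOf?, List.idxOf?] at h
  | cons x t ih =>
    intro k h
    by_cases hx : x = v
    · subst hx
      rw [PySem.List.index?_cons_self] at h
      simp only [Option.some.injEq] at h
      simp [bubbleGo, ← h]
    · rw [PySem.List.index?_cons_of_ne t hx] at h
      cases hk : PySem.List.index? t v with
      | none => rw [hk] at h; simp at h
      | some k' =>
        rw [hk] at h
        simp only [Option.map_some, Option.some.injEq] at h
        simp only [bubbleGo, if_neg hx]
        rw [ih k' hk, ← h]
        push_cast
        ring

-- index? over an append whose left part misses v
theorem index?_append_of_not_mem (v : Int) : ∀ (l m : List Int), v ∉ l →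
    PySem.List.index? (l ++ m) v = (PySem.List.index? m v).map (· + l.length) := by
  intro l
  induction l with
  | nil => intro m _; simp
  | cons x t ih =>
    intro m hv
    have hx : x ≠ v := fun h => hv (h ▸ List.mem_cons_self)
    have ht : v ∉ t := fun h => hv (List.mem_cons_of_mem _ h)
    rw [List.cons_append, PySem.List.index?_cons_of_ne _ hx, ih m ht]
    cases PySem.List.index? m v
    · simp
    · simp [Nat.add_assoc]

-- a one-element list: both sides are 0
theorem pv_singleton (c : Int) : minimumSwaps [c] = minimumSwaps_alt [c] := by
  simp [minimumSwaps, minimumSwaps_alt, loopA, stepA, bubbleFront, bubbleGo,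
    PySem.List.slice?_none_none_neg_one, PySem.List.min?, PySem.List.max?]

-- ===== VERDICT (by name: the statement is the Claim_ definition above) =====
theorem minimumSwaps_spec : Claim_equal_minimumSwaps := by
  unfold Claim_equal_minimumSwaps
  intro nums _
  unfold Spec_minimumSwaps
  rcases eq_or_ne nums [] with rfl | hl
  · decide
  · obtain ⟨h1, h2, h3, h4, h5, h6⟩ := loopA_inv nums hl
    set mn := mnv nums with hmn
    set mx := mxv nums with hmx
    set mi := (loopA nums).1 with hmi
    set mi2 := (loopA nums).2 with hmi2
    obtain ⟨P, S, hPS, hPlen, hPmem⟩ := (PySem.List.index?_eq_some_iff _ _ _).mp h5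
    have hr : nums.reverse = S.reverse ++ (mn :: P.reverse) := by
      rw [hPS]; simp [List.reverse_append]
    have hlen : nums.length = P.length + 1 + S.length := by rw [hPS]; simp; omega
    rw [hr] at h6
    obtain ⟨ht, hrt, hprev⟩ := PySem.List.getElem_of_index?_eq_some h6
    rcases Nat.lt_trichotomy mi2 mi with hlt | heq | hgt
    · -- min before max: B pays mi2 + (n-1-mi) swaps, A's middle branch
      have htS : nums.length - 1 - mi < S.reverse.length := by
        simp only [List.length_reverse]; omega
      have hrtS : S.reverse[nums.length - 1 - mi]'htS = mx := by
        rw [← List.getElem_append_left htS (bs := mn :: P.reverse)]; exact hrt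
      have hmemS : mx ∈ S.reverse := List.mem_iff_getElem.mpr ⟨_, htS, hrtS⟩
      rw [PySem.List.index?_append_of_mem _ hmemS] at h6
      have hidxX : PySem.List.index? (S.reverse ++ (P.reverse ++ [mn])) mx
          = some (nums.length - 1 - mi) := by
        rw [PySem.List.index?_append_of_mem _ hmemS]; exact h6
      have hsnd := bubbleGo_snd mx _ _ hidxX
      have hgo1 : bubbleGo nums mn = (P ++ S, (P.length : Int)) := by
        rw [hPS]; exact bubbleGo_split mn P S hPmem
      have e1 : (PySem.List.min? nums fun x => x).getD 0 = mn := hmn.symm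
      have e2 : (PySem.List.max? nums fun x => x).getD 0 = mx := hmx.symm
      simp only [minimumSwaps, minimumSwaps_alt, if_neg hl, ← hmi, ← hmi2, e1, e2,
        bubbleFront, hgo1, PySem.List.slice?_none_none_neg_one, Option.getD_some,
        List.reverse_cons, List.reverse_append, List.append_assoc, hsnd,
        if_neg (Nat.ne_of_lt hlt), if_pos hlt]
      omega
    · -- first min index = last max index forces a one-element list
      have hmneq : mn = mx := by rw [← h4, ← h3, heq]
      have hPnil : P = [] := by
        cases hP : P with
        | nil => rfl
        | cons p ps =>
          exfalso
          have hpmem : p ∈ nums := by rw [hPS, hP]; simp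
          have hple : mn ≤ p := mnv_isMin nums hl p hpmem
          have hpge : p ≤ mx := mxv_isMax nums hl p hpmem
          have : p = mn := by omega
          exact hPmem (by rw [hP, this]; exact List.mem_cons_self)
      have hmi20 : mi2 = 0 := by rw [← hPlen, hPnil]; rfl
      have hmi0 : mi = 0 := by omega
      have hn1 : nums.length = 1 := by
        by_contra hne1
        have hn2 : 1 < nums.length := by
          have := List.length_pos_of_ne_nil hl; omega
        have h0t : 0 < nums.length - 1 - mi := by omega
        have h0len : 0 < (S.reverse ++ (mn :: P.reverse)).length := by
          rw [← hr]; simpa using List.length_pos_of_ne_nil hl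
        have hne := hprev 0 h0t
        have h0mem : (S.reverse ++ (mn :: P.reverse))[0]'h0len ∈ nums := by
          rw [← List.mem_reverse, hr]; exact List.getElem_mem h0len
        have hle := mnv_isMin nums hl _ h0mem
        have hge := mxv_isMax nums hl _ h0mem
        rw [← hmn] at hle
        rw [← hmx] at hge
        exact hne (by omega)
      obtain ⟨c, hc⟩ := List.length_eq_one_iff.mp hn1
      rw [hc]
      exact pv_singleton c
    · -- max before min: the min passes the max once, B pays one swap less in phase 2
      have hSlen : S.length = nums.length - 1 - mi2 := by omega
      have hSt : S.reverse.length < nums.length - 1 - mi := by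
        simp only [List.length_reverse]; omega
      have hnotS : mx ∉ S.reverse := by
        intro hm
        obtain ⟨j, hj, hjv⟩ := List.mem_iff_getElem.mp hm
        have hjt : j < nums.length - 1 - mi := by omega
        exact hprev j hjt (by rw [List.getElem_append_left hj]; exact hjv)
      have hneq : mn ≠ mx := by
        have hb : S.reverse.length < (S.reverse ++ (mn :: P.reverse)).length := by simp
        have := hprev S.reverse.length hSt
        rw [List.getElem_append_right (le_refl _)] at this
        simpa using this
      rw [index?_append_of_not_mem mx _ _ hnotS] at h6
      cases hu : PySem.List.index? (mn :: P.reverse) mx with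
      | none => rw [hu] at h6; simp at h6
      | some u =>
        rw [hu] at h6
        simp only [Option.map_some, Option.some.injEq] at h6
        rw [PySem.List.index?_cons_of_ne _ hneq] at hu
        cases hw : PySem.List.index? P.reverse mx with
        | none => rw [hw] at hu; simp at hu
        | some w =>
          rw [hw] at hu
          simp only [Option.map_some, Option.some.injEq] at hu
          have hmemP : mx ∈ P.reverse :=
            (PySem.List.index?_isSome_iff _ _).mp (by rw [hw]; rfl)
          have hidxX : PySem.List.index? (S.reverse ++ (P.reverse ++ [mn])) mx
              = some (w + S.reverse.length) := by
            rw [index?_append_of_not_mem mx _ _ hnotS,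
              PySem.List.index?_append_of_mem _ hmemP, hw]
            rfl
          have hsnd := bubbleGo_snd mx _ _ hidxX
          have hgo1 : bubbleGo nums mn = (P ++ S, (P.length : Int)) := by
            rw [hPS]; exact bubbleGo_split mn P S hPmem
          have e1 : (PySem.List.min? nums fun x => x).getD 0 = mn := hmn.symm
          have e2 : (PySem.List.max? nums fun x => x).getD 0 = mx := hmx.symm
          simp only [minimumSwaps, minimumSwaps_alt, if_neg hl, ← hmi, ← hmi2, e1, e2,
            bubbleFront, hgo1, PySem.List.slice?_none_none_neg_one, Option.getD_some,
            List.reverse_cons, List.reverse_append, List.append_assoc, hsnd,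
            if_neg (Nat.ne_of_gt hgt), if_neg (Nat.not_lt_of_gt hgt)]
          simp only [List.length_reverse] at h6 hu ⊢
          omega
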